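-- pv_equiv track=rewrite | github.com/Pranshu1993/Data-Extraction-Text-Analysis | Code.py | complex_words
-- ===== SOURCE A (Python) =====
-- def complex_words(text):
--     vowels = ['A','E','I','O','U']
--     cw = 0
--     for x in text:
--         count = 0
--         for i in range(0,len(x)-1):
--             if x[i] in vowels and x[i+1] not in vowels:
--                 count = count + 1
--                 if x.endswith("E") or x.endswith("ED"):
--                     count -= 1
--         if count > 2:
--             cw = cw + 1
--     return cw
-- ===== SOURCE B (Python) =====
-- def complex_words(text):
--     cw = 0
--     for x in text:
--         if x.endswith('E') or x.endswith('ED'):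
--             continue
--         groups = len(''.join(c if c in 'AEIOU' else ' ' for c in x).split())
--         if x and x[-1] in 'AEIOU':
--             groups -= 1
--         if groups > 2:
--             cw += 1
--     return cw
-- ===== Notes on version B (the rewrite author's own statement) =====
-- stated objective: idiomatic
-- what changed: B replaces A's indexed adjacent-pair scan (with its per-hit cancel-out subtraction for E/ED words) by a staged run-based pipeline: skip E/ED words upfront, blank out every non-vowel, str.split() the result into maximal vowel runs, and count runs not at the word's end (a run followed by a non-vowel is exactly one vowel-to-non-vowel boundary).
import Mathlib
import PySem

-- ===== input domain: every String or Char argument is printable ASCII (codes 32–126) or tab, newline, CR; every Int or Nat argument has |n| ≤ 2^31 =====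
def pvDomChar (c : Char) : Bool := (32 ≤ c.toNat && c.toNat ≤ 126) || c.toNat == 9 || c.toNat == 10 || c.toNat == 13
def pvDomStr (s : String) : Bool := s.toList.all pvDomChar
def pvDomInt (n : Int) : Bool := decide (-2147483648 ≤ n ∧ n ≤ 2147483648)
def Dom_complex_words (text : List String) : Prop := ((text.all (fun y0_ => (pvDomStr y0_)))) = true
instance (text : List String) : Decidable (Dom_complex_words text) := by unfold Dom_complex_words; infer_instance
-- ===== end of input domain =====

-- B replaces A's indexed adjacent-pair scan by a staged run-based pipeline
-- (blank out non-vowels, whitespace-split into vowel runs, count runs not at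
-- the word's end), skipping E/ED-final words upfront (idiomatic; same cost).


-- ===== PORT A =====
-- literal transliteration of A: indexed inner loop over range(0, len(x)-1),
-- count += 1 at each vowel→non-vowel boundary, then count -= 1 if x ends with "E"/"ED"
def complex_words (text : List String) : Int :=
  let vowels : List Char := ['A', 'E', 'I', 'O', 'U']
  text.foldl (fun cw x =>
    let count : Int :=
      (PySem.List.pyRange 0 (PySem.Str.len x - 1) 1).foldl (fun count i =>
        match PySem.Str.pyGet? x i, PySem.Str.pyGet? x (i + 1) with
        | some a, some b =>
          if a ∈ vowels ∧ b ∉ vowels then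
            let c := count + 1
            if PySem.Str.endswith x "E" || PySem.Str.endswith x "ED" then c - 1 else c
          else count
        | _, _ => count) 0
    if count > 2 then cw + 1 else cw) 0

-- ===== PORT B =====
-- transliteration of B: skip E/ED words ('continue'), blank out non-vowels
-- (''.join of the per-char generator = map over the code points), split() into
-- maximal vowel runs, drop the final run if the word ends in a vowel
def complex_words_alt (text : List String) : Int :=
  text.foldl (fun cw x =>
    if PySem.Str.endswith x "E" || PySem.Str.endswith x "ED" then cw
    else
      let groups : Int :=
        (PySem.Chars.split₀ (x.toList.map (fun c =>
          if c ∈ ['A', 'E', 'I', 'O', 'U'] then c else ' '))).length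
      let groups : Int :=
        if (match PySem.Str.pyGet? x (-1) with
            | some c => decide (c ∈ ['A', 'E', 'I', 'O', 'U'])
            | none => false) then groups - 1 else groups
      if groups > 2 then cw + 1 else cw) 0

-- ===== PRECONDITION & SPEC =====
def Spec_complex_words (text : List String) (out : Int) : Prop := out = complex_words_alt text
instance (text : List String) (out : Int) : Decidable (Spec_complex_words text out) := by unfold Spec_complex_words; infer_instance

-- ===== CLAIM (what is proved, stated in full; the proofs are below) =====
def Claim_equal_complex_words : Prop := ∀ (text : List String), Dom_complex_words text → Spec_complex_words text (complex_words text)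

-- ===== LEMMAS AND PROOFS =====

lemma pv_foldl_id {α β : Type} (l : List α) (acc : β) :
    l.foldl (fun a _ => a) acc = acc := by
  induction l generalizing acc with
  | nil => rfl
  | cons h t ih => simp [ih acc]

-- A's inner loop over an abstract pair list
lemma pv_inner_core (cs : List Char) (pairs : List (Char × Char)) (e : Bool)
    (hpairs : pairs = cs.zip cs.tail)
    (hlen : ((cs.length : Int) - 1) = (pairs.length : Int)) :
    (PySem.List.pyRange 0 ((cs.length : Int) - 1) 1).foldl (fun count i =>
        match PySem.List.pyGet? cs i, PySem.List.pyGet? cs (i + 1) with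
        | some a, some b =>
          if a ∈ ['A', 'E', 'I', 'O', 'U'] ∧ b ∉ ['A', 'E', 'I', 'O', 'U'] then
            if e then count + 1 - 1 else count + 1
          else count
        | _, _ => count) (0 : Int)
    = if e then 0
      else (pairs.countP
        (fun p => decide (p.1 ∈ ['A', 'E', 'I', 'O', 'U']) &&
                  !decide (p.2 ∈ ['A', 'E', 'I', 'O', 'U'])) : Int) := by
  have hfold := PySem.List.foldl_pyRange_zero_pyGetD' pairs ('A', 'A')
    (fun (count : Int) (p : Char × Char) =>
      if p.1 ∈ ['A', 'E', 'I', 'O', 'U'] ∧ p.2 ∉ ['A', 'E', 'I', 'O', 'U'] then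
        if e then count + 1 - 1 else count + 1
      else count) 0
  rw [hlen]
  have hcongr : ∀ (acc : Int), ∀ i ∈ PySem.List.pyRange 0 ((pairs.length : Int)) 1,
      (match PySem.List.pyGet? cs i, PySem.List.pyGet? cs (i + 1) with
        | some a, some b =>
          if a ∈ ['A', 'E', 'I', 'O', 'U'] ∧ b ∉ ['A', 'E', 'I', 'O', 'U'] then
            if e then acc + 1 - 1 else acc + 1
          else acc
        | _, _ => acc)
      = (fun (count : Int) (p : Char × Char) =>
          if p.1 ∈ ['A', 'E', 'I', 'O', 'U'] ∧ p.2 ∉ ['A', 'E', 'I', 'O', 'U'] then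
            if e then count + 1 - 1 else count + 1
          else count) acc (PySem.List.pyGetD pairs i ('A', 'A')) := by
    intro acc i hi
    have hi' := (PySem.List.mem_pyRange_one).1 hi
    have h0 : 0 ≤ i := hi'.1
    have h1 : i < (pairs.length : Int) := hi'.2
    have hkc : i.toNat + 1 < cs.length := by omega
    have hg1 : PySem.List.pyGet? cs i = some cs[i.toNat] :=
      PySem.List.pyGet?_eq_some_getElem cs h0 (by omega)
    have hg2 : PySem.List.pyGet? cs (i + 1) = some cs[i.toNat + 1] := by
      rw [show i + 1 = ((i.toNat + 1 : Nat) : Int) by omega, PySem.List.pyGet?_natCast]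
      exact List.getElem?_eq_getElem hkc
    have hgp : PySem.List.pyGetD pairs i ('A', 'A') = (cs[i.toNat], cs[i.toNat + 1]) := by
      rw [PySem.List.pyGetD_eq_getElem pairs ('A', 'A') h0 h1]
      subst hpairs
      simp [List.getElem_zip, List.getElem_tail]
    rw [hg1, hg2, hgp]
  rw [PySem.List.foldl_congr_mem _ _ _ 0 hcongr, hfold]
  cases e with
  | true =>
    simp only [reduceIte]
    have hid := PySem.List.foldl_congr_mem pairs
      (fun (count : Int) (p : Char × Char) =>
        if p.1 ∈ ['A', 'E', 'I', 'O', 'U'] ∧ p.2 ∉ ['A', 'E', 'I', 'O', 'U'] then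
          count + 1 - 1 else count)
      (fun (a : Int) (_ : Char × Char) => a) 0
      (fun acc p _ => by beta_reduce; split <;> simp)
    rw [hid, pv_foldl_id pairs 0]
  | false =>
    simp only [reduceIte, Bool.false_eq_true]
    rw [PySem.List.foldl_ite_add_one, zero_add]
    exact congrArg _ (List.countP_congr (fun p _ => by simp))

-- A's inner loop, for a word with character list cs and (constant) endswith-flag e
lemma pv_inner_eq (cs : List Char) (e : Bool) :
    (PySem.List.pyRange 0 ((cs.length : Int) - 1) 1).foldl (fun count i =>
        match PySem.List.pyGet? cs i, PySem.List.pyGet? cs (i + 1) with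
        | some a, some b =>
          if a ∈ ['A', 'E', 'I', 'O', 'U'] ∧ b ∉ ['A', 'E', 'I', 'O', 'U'] then
            if e then count + 1 - 1 else count + 1
          else count
        | _, _ => count) (0 : Int)
    = if e then 0
      else ((cs.zip cs.tail).countP
        (fun p => decide (p.1 ∈ ['A', 'E', 'I', 'O', 'U']) &&
                  !decide (p.2 ∈ ['A', 'E', 'I', 'O', 'U'])) : Int) := by
  rcases cs with _ | ⟨c0, cs'⟩
  · simp [PySem.List.pyRange_one_eq_nil]
  · exact pv_inner_core (c0 :: cs') ((c0 :: cs').zip (c0 :: cs').tail) e rfl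
      (by simp [List.length_zip])

-- ---- B-side: run counting via split₀ on the vowel-masked string ----

lemma pv_isspace_of_vowel (c : Char) (h : c ∈ ['A', 'E', 'I', 'O', 'U']) :
    PySem.Chars.isspace c = false := by
  fin_cases h <;> decide

lemma pv_isspace_space : PySem.Chars.isspace ' ' = true := by decide

-- the accumulator only contributes its length
lemma pv_len_go (s : List Char) (cur : List Char) (acc : List (List Char)) :
    (PySem.Chars.split₀.go s cur acc).length
      = acc.length + (PySem.Chars.split₀.go s cur []).length := by
  induction s generalizing cur acc with
  | nil =>
    by_cases h : cur.isEmpty <;> simp [PySem.Chars.split₀.go, h]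
  | cons c rest ih =>
    by_cases hs : PySem.Chars.isspace c
    · by_cases h : cur.isEmpty
      · simp only [PySem.Chars.split₀.go, hs, h, reduceIte]
        exact ih [] acc
      · simp only [PySem.Chars.split₀.go, hs, h, Bool.false_eq_true, reduceIte]
        rw [ih [] (cur.reverse :: acc), ih [] [cur.reverse]]
        simp only [List.length_cons, List.length_nil]
        omega
    · simp only [PySem.Chars.split₀.go, hs, Bool.false_eq_true, reduceIte]
      exact ih (c :: cur) acc

-- the word count only depends on whether the current run is empty
lemma pv_go_len_cur (s : List Char) (cur cur' : List Char)
    (h : cur ≠ []) (h' : cur' ≠ []) :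
    (PySem.Chars.split₀.go s cur []).length
      = (PySem.Chars.split₀.go s cur' []).length := by
  induction s generalizing cur cur' with
  | nil =>
    simp [PySem.Chars.split₀.go, List.isEmpty_iff, h, h']
  | cons c rest ih =>
    by_cases hs : PySem.Chars.isspace c
    · simp only [PySem.Chars.split₀.go, hs, List.isEmpty_iff, h, h', reduceIte]
      rw [pv_len_go rest [] [cur.reverse], pv_len_go rest [] [cur'.reverse]]
      simp
    · simp only [PySem.Chars.split₀.go, hs, Bool.false_eq_true, reduceIte]
      exact ih (c :: cur) (c :: cur') (by simp) (by simp)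

-- run count of the masked word = boundary count + (1 if the word ends in a vowel)
lemma pv_runs_eq (cs : List Char) :
    ((PySem.Chars.split₀ (cs.map (fun c =>
        if c ∈ ['A', 'E', 'I', 'O', 'U'] then c else ' '))).length : Int)
    = ((cs.zip cs.tail).countP
        (fun p => decide (p.1 ∈ ['A', 'E', 'I', 'O', 'U']) &&
                  !decide (p.2 ∈ ['A', 'E', 'I', 'O', 'U'])) : Int)
      + (match cs.getLast? with
         | some c => if c ∈ ['A', 'E', 'I', 'O', 'U'] then (1 : Int) else 0
         | none => 0) := by
  induction cs with
  | nil => decide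
  | cons c cs ih =>
    cases cs with
    | nil =>
      by_cases hc : c ∈ ['A', 'E', 'I', 'O', 'U']
      · have hm : (if c ∈ ['A', 'E', 'I', 'O', 'U'] then c else ' ') = c := if_pos hc
        have hns := pv_isspace_of_vowel c hc
        simp only [List.map_cons, List.map_nil, hm]
        simp [PySem.Chars.split₀, PySem.Chars.split₀.go, hns, hc]
      · have hm : (if c ∈ ['A', 'E', 'I', 'O', 'U'] then c else ' ') = ' ' := if_neg hc
        simp only [List.map_cons, List.map_nil, hm]
        simp [PySem.Chars.split₀, PySem.Chars.split₀.go, hc, pv_isspace_space]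
    | cons d ds =>
      have hlast : (c :: d :: ds).getLast? = (d :: ds).getLast? := by
        simp [List.getLast?_cons_cons]
      by_cases hc : c ∈ ['A', 'E', 'I', 'O', 'U']
      · have hmc : (if c ∈ ['A', 'E', 'I', 'O', 'U'] then c else ' ') = c := if_pos hc
        have hns := pv_isspace_of_vowel c hc
        by_cases hd : d ∈ ['A', 'E', 'I', 'O', 'U']
        · -- both vowels: c joins d's run; the pair (c, d) is not a boundary
          have hmd : (if d ∈ ['A', 'E', 'I', 'O', 'U'] then d else ' ') = d := if_pos hd
          have hnsd := pv_isspace_of_vowel d hd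
          have hgo : (PySem.Chars.split₀ ((c :: d :: ds).map (fun c =>
              if c ∈ ['A', 'E', 'I', 'O', 'U'] then c else ' '))).length
              = (PySem.Chars.split₀ ((d :: ds).map (fun c =>
              if c ∈ ['A', 'E', 'I', 'O', 'U'] then c else ' '))).length := by
            simp only [List.map_cons, hmc, hmd, PySem.Chars.split₀, PySem.Chars.split₀.go,
              hns, hnsd, Bool.false_eq_true, reduceIte]
            exact pv_go_len_cur _ _ _ (by simp) (by simp)
          rw [hgo, hlast]
          simp only [List.zip_cons_cons, List.tail_cons, List.countP_cons]
          rw [ih]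
          simp [hc, hd]
        · -- vowel then non-vowel: a run ends here; the pair (c, d) is a boundary
          have hmd : (if d ∈ ['A', 'E', 'I', 'O', 'U'] then d else ' ') = ' ' := if_neg hd
          have hgo : (PySem.Chars.split₀ ((c :: d :: ds).map (fun c =>
              if c ∈ ['A', 'E', 'I', 'O', 'U'] then c else ' '))).length
              = 1 + (PySem.Chars.split₀ ((d :: ds).map (fun c =>
              if c ∈ ['A', 'E', 'I', 'O', 'U'] then c else ' '))).length := by
            simp only [List.map_cons, hmc, hmd, PySem.Chars.split₀, PySem.Chars.split₀.go,
              hns, pv_isspace_space, Bool.false_eq_true, reduceIte, List.isEmpty_cons,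
              List.isEmpty_nil]
            rw [pv_len_go]
            simp
          rw [hgo, hlast]
          simp only [List.zip_cons_cons, List.tail_cons, List.countP_cons]
          push_cast
          rw [ih]
          simp only [hc, hd, decide_true, decide_false, Bool.not_false, Bool.and_true,
            reduceIte]
          simp only [List.tail_cons]

          ring
      · -- non-vowel head: masked to a blank, skipped; (c, d) is not a boundary
        have hmc : (if c ∈ ['A', 'E', 'I', 'O', 'U'] then c else ' ') = ' ' := if_neg hc
        have hgo : (PySem.Chars.split₀ ((c :: d :: ds).map (fun c =>
            if c ∈ ['A', 'E', 'I', 'O', 'U'] then c else ' '))).length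
            = (PySem.Chars.split₀ ((d :: ds).map (fun c =>
            if c ∈ ['A', 'E', 'I', 'O', 'U'] then c else ' '))).length := by
          simp only [List.map_cons, hmc, PySem.Chars.split₀, PySem.Chars.split₀.go,
            pv_isspace_space, List.isEmpty_nil, reduceIte]
        rw [hgo, hlast]
        simp only [List.zip_cons_cons, List.tail_cons, List.countP_cons]
        rw [ih]
        simp [hc]

-- ===== VERDICT (by name: the statement is the Claim_ definition above) =====
theorem complex_words_spec : Claim_equal_complex_words := by
  intro text _
  unfold Spec_complex_words complex_words complex_words_alt
  simp only []
  refine PySem.List.foldl_congr_mem text _ _ 0 (fun cw x _ => ?_)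
  simp only [PySem.Str.len_eq, PySem.Str.pyGet?_eq, PySem.Chars.pyGet?_eq_listPyGet?]
  simp only [pv_inner_eq x.toList (PySem.Str.endswith x "E" || PySem.Str.endswith x "ED")]
  cases he : (PySem.Str.endswith x "E" || PySem.Str.endswith x "ED") with
  | true => simp
  | false =>
    simp only [Bool.false_eq_true, reduceIte]
    simp only [PySem.List.pyGet?_neg_one]
    have hruns := pv_runs_eq x.toList
    cases hL : x.toList.getLast? with
    | none =>
      rw [hL] at hruns
      simp at hruns
      simp [hruns]
    | some c =>
      rw [hL] at hruns
      by_cases hcv : c ∈ ['A', 'E', 'I', 'O', 'U']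
      · simp [hcv] at hruns
        simp [hruns, hcv]
      · simp [hcv] at hruns
        simp [hruns, hcv]
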